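-- pv_equiv track=rewrite | github.com/Darshil-Solanki/LeetCode | contest/splitAndMergeArrayTransformation.py | minSplitMerge
-- ===== SOURCE A (Python) =====
-- from typing import List
--
-- def minSplitMerge(nums1: List[int], nums2: List[int]) -> int:
--     n = len(nums1)
--     if nums1==nums2:
--         return 0
--
--     def find(nums, split):
--         if nums==nums2:
--             return True
--         if not split:
--             return False
--
--         for l in range(n):
--             left = nums[:l+1]
--             for r in range(l+1, n):
--                 new = left+nums[r+1:]
--                 mid = nums[l+1:r+1]
--                 for i in range(len(new)):
--                     if find(new[:i]+mid+new[i:], split-1):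
--                         return True
--         return False
--
--     def check(split):
--         return find(nums1[:], split)
--
--     for i in range(1, n+1):
--         if check(i):
--             return i
--     return n
-- ===== SOURCE B (Python) =====
-- from typing import List
--
-- def minSplitMerge(nums1: List[int], nums2: List[int]) -> int:
--     # Breadth-first search over array states with a monotone reached-set,
--     # capped at n rounds, instead of A's exponential iterative-deepening DFS.
--     n = len(nums1)
--
--     def neighbors(t):
--         return [new[:i] + mid + new[i:]
--                 for l in range(n)
--                 for r in range(l + 1, n)
--                 for new in (t[:l + 1] + t[r + 1:],)
--                 for mid in (t[l + 1:r + 1],)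
--                 for i in range(len(new))]
--
--     target = tuple(nums2)
--     reach = {tuple(nums1)}
--     for depth in range(n + 1):
--         if target in reach:
--             return depth
--         reach |= {u for s in reach for u in neighbors(s)}
--     return n
-- ===== Notes on version B (the rewrite author's own statement) =====
-- stated objective: faster
-- what changed: Replaced A's unmemoized iterative-deepening DFS (re-exploring the whole branching tree for every depth bound) by a breadth-first search that grows one monotone set of reached array states, returning the first depth at which nums2 appears, capped at n.
import Mathlib
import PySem

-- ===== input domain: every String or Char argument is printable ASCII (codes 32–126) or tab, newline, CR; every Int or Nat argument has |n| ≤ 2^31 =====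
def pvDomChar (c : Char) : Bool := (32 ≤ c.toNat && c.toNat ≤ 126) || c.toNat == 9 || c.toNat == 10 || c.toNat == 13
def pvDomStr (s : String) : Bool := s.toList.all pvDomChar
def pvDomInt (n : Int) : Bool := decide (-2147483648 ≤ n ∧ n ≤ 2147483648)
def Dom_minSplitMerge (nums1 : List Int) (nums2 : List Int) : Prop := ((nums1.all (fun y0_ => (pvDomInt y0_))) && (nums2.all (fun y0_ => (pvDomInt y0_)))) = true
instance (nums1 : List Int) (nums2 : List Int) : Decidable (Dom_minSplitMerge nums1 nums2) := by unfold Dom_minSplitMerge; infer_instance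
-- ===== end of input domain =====

-- B replaces A's exponential iterative-deepening DFS by a breadth-first search that grows a
-- monotone reached-set of array states, capped at n rounds (objective: faster).


-- ===== PORT A =====
-- A's inner `find(nums, split)`: DFS over the triple loop, fuel = split.
-- Slices nums[:l+1], nums[l+1:r+1], nums[r+1:] have nonnegative in-range bounds (l, r, i come
-- from range(n) / range(len(new))), so take/drop are exact here.
def findA (nums2 : List Int) (n : Nat) : Nat → List Int → Bool
  | fuel, nums =>
    if nums = nums2 then true
    else
      match fuel with
      | 0 => false
      | s + 1 =>
        (List.range n).any fun l =>
          (List.range' (l + 1) (n - (l + 1))).any fun r =>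
            let left := nums.take (l + 1)
            let new := left ++ nums.drop (r + 1)
            let mid := (nums.drop (l + 1)).take (r - l)
            (List.range new.length).any fun i =>
              findA nums2 n s (new.take i ++ mid ++ new.drop i)

-- A's top loop `for i in range(1, n+1): if check(i): return i` then `return n`.
def aLoop (nums1 nums2 : List Int) (n : Nat) : Nat → Nat → Int
  | 0, _ => (n : Int)
  | c + 1, i => if findA nums2 n i nums1 then (i : Int) else aLoop nums1 nums2 n c (i + 1)

def minSplitMerge (nums1 : List Int) (nums2 : List Int) : Int :=
  let n := nums1.length
  if nums1 = nums2 then 0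
  else aLoop nums1 nums2 n n 1

-- ===== PORT B =====
-- B's `neighbors(t)`: all states one split-merge move away (same in-range slices as above).
def nbrsB (n : Nat) (t : List Int) : List (List Int) :=
  (List.range n).flatMap fun l =>
    (List.range' (l + 1) (n - (l + 1))).flatMap fun r =>
      let new := t.take (l + 1) ++ t.drop (r + 1)
      let mid := (t.drop (l + 1)).take (r - l)
      (List.range new.length).map fun i => new.take i ++ mid ++ new.drop i

-- B's `reach |= {u for s in reach for u in neighbors(s)}` (set union; order only feeds a set).
def expandB (n : Nat) (reach : PySem.Set (List Int)) : PySem.Set (List Int) :=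
  PySem.Set.union reach (reach.flatMap (nbrsB n))

-- B's `for depth in range(n+1): if target in reach: return depth; …` then `return n`.
def bfsLoop (target : List Int) (n : Nat) : Nat → Nat → PySem.Set (List Int) → Int
  | 0, _, _ => (n : Int)
  | c + 1, d, reach =>
    if target ∈ reach then (d : Int) else bfsLoop target n c (d + 1) (expandB n reach)

def minSplitMerge_alt (nums1 : List Int) (nums2 : List Int) : Int :=
  let n := nums1.length
  bfsLoop nums2 n (n + 1) 0 (PySem.Set.ofList [nums1])

-- ===== PRECONDITION & SPEC =====
def Spec_minSplitMerge (nums1 : List Int) (nums2 : List Int) (out : Int) : Prop := out = minSplitMerge_alt nums1 nums2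
instance (nums1 : List Int) (nums2 : List Int) (out : Int) : Decidable (Spec_minSplitMerge nums1 nums2 out) := by unfold Spec_minSplitMerge; infer_instance

-- ===== CLAIM (what is proved, stated in full; the proofs are below) =====
def Claim_equal_minSplitMerge : Prop := ∀ (nums1 : List Int) (nums2 : List Int), Dom_minSplitMerge nums1 nums2 → Spec_minSplitMerge nums1 nums2 (minSplitMerge nums1 nums2)

-- ===== LEMMAS AND PROOFS =====

-- "b is reachable from a in at most k moves" (front decomposition, A's shape).
def pLe (n : Nat) : Nat → List Int → List Int → Prop
  | 0, a, b => a = b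
  | k + 1, a, b => a = b ∨ ∃ u ∈ nbrsB n a, pLe n k u b

-- Back decomposition of the same relation (B's shape).
theorem pLe_succ_back (n k : Nat) : ∀ a b, pLe n (k + 1) a b ↔ pLe n k a b ∨ ∃ t, pLe n k a t ∧ b ∈ nbrsB n t := by
  induction k with
  | zero =>
    intro a b
    simp only [pLe]
    constructor
    · rintro (h | ⟨u, hu, rfl⟩)
      · exact Or.inl h
      · exact Or.inr ⟨a, rfl, hu⟩
    · rintro (h | ⟨t, rfl, hb⟩)
      · exact Or.inl h
      · exact Or.inr ⟨b, hb, rfl⟩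
  | succ k ih =>
    intro a b
    constructor
    · rintro (h | ⟨u, hu, hp⟩)
      · exact Or.inl (Or.inl h)
      · rcases (ih u b).mp hp with h' | ⟨t, ht, hb⟩
        · exact Or.inl (Or.inr ⟨u, hu, h'⟩)
        · exact Or.inr ⟨t, Or.inr ⟨u, hu, ht⟩, hb⟩
    · rintro ((h | ⟨u, hu, hp⟩) | ⟨t, (h | ⟨u, hu, hp⟩), hb⟩)
      · exact Or.inl h
      · exact Or.inr ⟨u, hu, (ih u b).mpr (Or.inl hp)⟩
      · subst h; exact Or.inr ⟨b, hb, Or.inl rfl⟩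
      · exact Or.inr ⟨u, hu, (ih u b).mpr (Or.inr ⟨t, hp, hb⟩)⟩

-- A's triple loop of `any`s is `any` over B's neighbour list.
theorem findA_succ (nums2 : List Int) (n s : Nat) (nums : List Int) :
    findA nums2 n (s + 1) nums =
      (decide (nums = nums2) || (nbrsB n nums).any (findA nums2 n s)) := by
  rw [findA]
  by_cases h : nums = nums2
  · simp [h]
  · simp only [h, if_false, nbrsB, List.any_flatMap, List.any_map]
    rfl

theorem findA_iff (nums2 : List Int) (n : Nat) :
    ∀ fuel nums, findA nums2 n fuel nums = true ↔ pLe n fuel nums nums2 := by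
  intro fuel
  induction fuel with
  | zero =>
    intro nums
    rw [findA]
    by_cases h : nums = nums2 <;> simp [h, pLe]
  | succ s ih =>
    intro nums
    rw [findA_succ]
    simp only [Bool.or_eq_true, decide_eq_true_eq, List.any_eq_true, pLe]
    constructor
    · rintro (h | ⟨u, hu, hf⟩)
      · exact Or.inl h
      · exact Or.inr ⟨u, hu, (ih u).mp hf⟩
    · rintro (h | ⟨u, hu, hp⟩)
      · exact Or.inl h
      · exact Or.inr ⟨u, hu, (ih u).mpr hp⟩

theorem mem_expandB (n : Nat) (R : PySem.Set (List Int)) (x : List Int) :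
    x ∈ expandB n R ↔ x ∈ R ∨ ∃ t ∈ R, x ∈ nbrsB n t := by
  simp [expandB, PySem.Set.mem_union, List.mem_flatMap]

-- the reached set after k expansions is exactly {x : pLe n k start x}
theorem reach_iff (n : Nat) (start : List Int) :
    ∀ (k : Nat) (x : List Int),
      x ∈ (expandB n)^[k] (PySem.Set.ofList [start]) ↔ pLe n k start x := by
  intro k
  induction k with
  | zero =>
    intro x
    simp [PySem.Set.mem_ofList, pLe, eq_comm]
  | succ k ih =>
    intro x
    rw [Function.iterate_succ_apply', mem_expandB, pLe_succ_back]
    constructor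
    · rintro (h | ⟨t, ht, hx⟩)
      · exact Or.inl ((ih x).mp h)
      · exact Or.inr ⟨t, (ih t).mp ht, hx⟩
    · rintro (h | ⟨t, ht, hx⟩)
      · exact Or.inl ((ih x).mpr h)
      · exact Or.inr ⟨t, (ih t).mpr ht, hx⟩

-- alignment of the two top-level loops
theorem loops_eq (nums1 nums2 : List Int) (n : Nat) :
    ∀ (c i : Nat),
      aLoop nums1 nums2 n c i = bfsLoop nums2 n c i ((expandB n)^[i] (PySem.Set.ofList [nums1])) := by
  intro c
  induction c with
  | zero => intro i; rfl
  | succ c ih =>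
    intro i
    rw [aLoop, bfsLoop]
    have hmem : (nums2 ∈ (expandB n)^[i] (PySem.Set.ofList [nums1])) ↔ findA nums2 n i nums1 = true := by
      rw [reach_iff, ← findA_iff]
    by_cases h : findA nums2 n i nums1 = true
    · simp [h, hmem.mpr h]
    · have h' : nums2 ∉ (expandB n)^[i] (PySem.Set.ofList [nums1]) := fun hm => h (hmem.mp hm)
      rw [if_neg h, if_neg h', ih (i + 1),
        ← Function.iterate_succ_apply' (expandB n) i (PySem.Set.ofList [nums1])]

-- ===== VERDICT (by name: the statement is the Claim_ definition above) =====
theorem minSplitMerge_spec : Claim_equal_minSplitMerge := by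
  intro nums1 nums2 _
  show minSplitMerge nums1 nums2 = minSplitMerge_alt nums1 nums2
  unfold minSplitMerge minSplitMerge_alt
  by_cases h : nums1 = nums2
  · simp [h, bfsLoop, PySem.Set.mem_ofList]
  · have h0 : nums2 ∉ PySem.Set.ofList [nums1] := by simp [PySem.Set.mem_ofList]; exact fun e => h e.symm
    rw [if_neg h, bfsLoop, if_neg h0, loops_eq]
    congr 1
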